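-- pv_equiv track=rewrite | github.com/Halex193/AILab | Lab1/cryptarithmetic.py | transform
-- ===== SOURCE A (Python) =====
-- def transform(word, cipher):
--     number = 0
--     if cipher[word[0]] == 0:
--         raise ArithmeticError("Word starts with 0")
--
--     for letter in word:
--         number *= 16
--         number += cipher[letter]
--     return number
-- ===== SOURCE B (Python) =====
-- def transform(word, cipher):
--     if cipher[word[0]] == 0:
--         raise ArithmeticError("Word starts with 0")
--     n = len(word)
--     return sum(cipher[letter] * 16 ** (n - 1 - i) for i, letter in enumerate(word))
-- ===== Notes on version B (the rewrite author's own statement) =====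
-- stated objective: alternative
-- what changed: Replaces the stateful Horner multiply-accumulate loop by a stateless positional-notation sum: each letter's digit is weighted by an explicit power 16**(n-1-i) and the weighted digits are summed.
import Mathlib
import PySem

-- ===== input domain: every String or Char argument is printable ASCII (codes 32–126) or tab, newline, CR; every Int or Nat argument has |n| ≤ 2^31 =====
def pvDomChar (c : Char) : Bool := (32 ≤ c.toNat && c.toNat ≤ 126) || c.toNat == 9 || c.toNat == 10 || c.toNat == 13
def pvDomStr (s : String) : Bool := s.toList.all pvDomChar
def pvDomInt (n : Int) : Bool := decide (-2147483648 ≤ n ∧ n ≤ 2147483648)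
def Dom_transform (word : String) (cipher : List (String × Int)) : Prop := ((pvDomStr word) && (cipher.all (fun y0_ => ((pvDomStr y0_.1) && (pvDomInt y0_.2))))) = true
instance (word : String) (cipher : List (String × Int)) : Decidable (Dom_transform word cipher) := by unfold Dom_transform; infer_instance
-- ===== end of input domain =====

-- B replaces A's stateful Horner loop with a stateless positional sum of digit * 16^(n-1-i); same cost, alternative structure.

-- ===== PORT A =====
-- Horner loop: number = number*16 + cipher[letter], left to right.
def transform (word : String) (cipher : List (String × Int)) : Int :=
  word.toList.foldl
    (fun number letter => number * 16 + (PySem.Dict.mk cipher).getD (String.ofList [letter]) 0)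
    0

-- ===== PORT B =====
-- Positional notation: sum of cipher[letter] * 16^(n-1-i) over enumerate(word).
def transform_alt (word : String) (cipher : List (String × Int)) : Int :=
  ((PySem.List.enumerate word.toList).map
    (fun p => (PySem.Dict.mk cipher).getD (String.ofList [p.2]) 0
              * 16 ^ (((word.toList.length : Int) - 1 - p.1).toNat))).sum

-- ===== PRECONDITION & SPEC =====
-- Pre_ excludes exactly the inputs where A raises: empty word (IndexError), a letter of word
-- missing from cipher (KeyError), and cipher[word[0]] == 0 (the explicit ArithmeticError).
def Pre_transform (word : String) (cipher : List (String × Int)) : Prop :=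
  word.toList ≠ [] ∧
  (word.toList.all fun c => ((PySem.Dict.mk cipher).get? (String.ofList [c])).isSome) = true ∧
  (PySem.Dict.mk cipher).getD (String.ofList [word.toList.headD ' ']) 0 ≠ 0
instance (word : String) (cipher : List (String × Int)) : Decidable (Pre_transform word cipher) := by
  unfold Pre_transform; infer_instance

def pvWitness_transform : String × (List (String × Int)) := ("ab", [("a", 1), ("b", 0)])

def Spec_transform (word : String) (cipher : List (String × Int)) (out : Int) : Prop := out = transform_alt word cipher
instance (word : String) (cipher : List (String × Int)) (out : Int) : Decidable (Spec_transform word cipher out) := by unfold Spec_transform; infer_instance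

-- ===== CLAIM (what is proved, stated in full; the proofs are below) =====
def Claim_equal_transform : Prop := ∀ (word : String) (cipher : List (String × Int)), Dom_transform word cipher → Pre_transform word cipher → Spec_transform word cipher (transform word cipher)

-- ===== LEMMAS AND PROOFS =====

theorem horner_shift (d : Char → Int) (l : List Char) (a : Int) :
    l.foldl (fun n c => n * 16 + d c) a
      = a * 16 ^ l.length + l.foldl (fun n c => n * 16 + d c) 0 := by
  induction l generalizing a with
  | nil => simp
  | cons c l ih =>
      simp only [List.foldl_cons, List.length_cons]
      rw [ih (a * 16 + d c), ih (0 * 16 + d c), pow_succ]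
      ring

theorem sum_enum_eq_horner (d : Char → Int) (n : Int) :
    ∀ (l : List Char) (s : Int), 0 ≤ s → s + l.length = n →
    ((PySem.List.enumerate l s).map (fun p => d p.2 * 16 ^ ((n - 1 - p.1).toNat))).sum
      = l.foldl (fun a c => a * 16 + d c) 0 := by
  intro l
  induction l with
  | nil => intro s _ _; simp [PySem.List.enumerate_nil]
  | cons c r ih =>
      intro s hs hn
      simp only [List.length_cons] at hn
      have he : (n - 1 - s).toNat = r.length := by push_cast at hn ⊢; omega
      rw [PySem.List.enumerate_cons, List.map_cons, List.sum_cons, he,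
        ih (s + 1) (by omega) (by push_cast at hn ⊢; omega),
        List.foldl_cons, horner_shift d r (0 * 16 + d c)]
      ring

-- ===== VERDICT (by name: the statement is the Claim_ definition above) =====
theorem transform_spec : Claim_equal_transform := by
  intro word cipher _ _
  unfold Spec_transform transform transform_alt
  exact (sum_enum_eq_horner
    (fun c => (PySem.Dict.mk cipher).getD (String.ofList [c]) 0)
    (word.toList.length : Int) word.toList 0 le_rfl (by simp)).symm
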